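-- pv_equiv track=rewrite | github.com/douglas06mp/aoc-2025 | day03/solution.py | findMaxAndPositionBetweenIdx
-- ===== SOURCE A (Python) =====
-- def findMaxAndPositionBetweenIdx(str, startIdx, endIdx):
--     max = -1
--     position = -1
--     for i, ch in enumerate(str[startIdx:endIdx]):
--         val = int(ch)
--         if val > max:
--             max = val
--             position = i
--
--     return max, position
-- ===== SOURCE B (Python) =====
-- def findMaxAndPositionBetweenIdx(str, startIdx, endIdx):
--     s = str[startIdx:endIdx]
--     m = max((int(c) for c in s), default=-1)
--     position = s.index(chr(ord('0') + m)) if s else -1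
--     return m, position
-- ===== Notes on version B (the rewrite author's own statement) =====
-- stated objective: alternative
-- what changed: A's single fused loop tracking running max and its position is replaced by two separate passes: a reduction max(..., default=-1) over the digit values, then s.index(chr(ord('0')+m)) to find the first position of that maximum; Pre_ requires every character of the slice to be a digit, since A raises ValueError in int(ch) otherwise.
import Mathlib
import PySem

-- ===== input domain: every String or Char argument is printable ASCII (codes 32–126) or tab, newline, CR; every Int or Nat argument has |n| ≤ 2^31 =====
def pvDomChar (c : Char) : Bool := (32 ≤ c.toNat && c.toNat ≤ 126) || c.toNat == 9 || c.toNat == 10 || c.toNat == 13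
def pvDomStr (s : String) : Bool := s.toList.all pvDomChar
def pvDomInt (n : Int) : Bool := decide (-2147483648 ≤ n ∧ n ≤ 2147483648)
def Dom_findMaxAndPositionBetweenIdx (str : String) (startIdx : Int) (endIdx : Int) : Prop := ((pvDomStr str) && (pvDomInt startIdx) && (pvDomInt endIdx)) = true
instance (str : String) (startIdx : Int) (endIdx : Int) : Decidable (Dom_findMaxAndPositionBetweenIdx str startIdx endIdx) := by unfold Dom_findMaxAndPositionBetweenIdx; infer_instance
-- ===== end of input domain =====

-- B replaces A's fused max-and-position loop by two separate passes (max value, then first index of it); same cost, different decomposition.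

-- ===== PORT A =====
-- int(ch) for a one-character string; getD 0 is never reached under Pre_ (A raises there)
def pvVal (c : Char) : Int := (PySem.Int.ofChars? [c]).getD 0

def findMaxAndPositionBetweenIdx (str : String) (startIdx : Int) (endIdx : Int) : Int × Int :=
  (PySem.List.enumerate (PySem.List.slice str.toList (some startIdx) (some endIdx))).foldl
    (fun st p => if pvVal p.2 > st.1 then (pvVal p.2, p.1) else st) (-1, -1)

-- ===== PORT B =====
def findMaxAndPositionBetweenIdx_alt (str : String) (startIdx : Int) (endIdx : Int) : Int × Int :=
  let s := PySem.List.slice str.toList (some startIdx) (some endIdx)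
  let m := PySem.List.maxD (s.map (fun c => (PySem.Int.ofChars? [c]).getD 0)) id (-1)
  let position : Int :=
    if s.isEmpty then -1
    else ((PySem.List.index? s (Char.ofNat (48 + m).toNat)).getD 0 : Nat)
  (m, position)

-- ===== PRECONDITION & SPEC =====
-- Pre_ excludes exactly the inputs where A raises: a non-digit character in the slice makes int(ch) raise ValueError.
def Pre_findMaxAndPositionBetweenIdx (str : String) (startIdx : Int) (endIdx : Int) : Prop :=
  (PySem.List.slice str.toList (some startIdx) (some endIdx)).all PySem.Chars.isdigit = true
instance (str : String) (startIdx : Int) (endIdx : Int) : Decidable (Pre_findMaxAndPositionBetweenIdx str startIdx endIdx) := by unfold Pre_findMaxAndPositionBetweenIdx; infer_instance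

def pvWitness_findMaxAndPositionBetweenIdx : String × Int × Int := ("3719", 1, 3)

def Spec_findMaxAndPositionBetweenIdx (str : String) (startIdx : Int) (endIdx : Int) (out : Int × Int) : Prop := out = findMaxAndPositionBetweenIdx_alt str startIdx endIdx
instance (str : String) (startIdx : Int) (endIdx : Int) (out : Int × Int) : Decidable (Spec_findMaxAndPositionBetweenIdx str startIdx endIdx out) := by unfold Spec_findMaxAndPositionBetweenIdx; infer_instance

-- ===== CLAIM (what is proved, stated in full; the proofs are below) =====
def Claim_equal_findMaxAndPositionBetweenIdx : Prop := ∀ (str : String) (startIdx : Int) (endIdx : Int), Dom_findMaxAndPositionBetweenIdx str startIdx endIdx → Pre_findMaxAndPositionBetweenIdx str startIdx endIdx → Spec_findMaxAndPositionBetweenIdx str startIdx endIdx (findMaxAndPositionBetweenIdx str startIdx endIdx)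

-- ===== LEMMAS AND PROOFS =====

-- value of a digit character
theorem pvVal_digit (c : Char) (h : PySem.Chars.isdigit c = true) :
    pvVal c = (c.toNat : Int) - 48 := by
  have : PySem.Int.ofChars? [c] = some ((c.toNat : Int) - 48) := by
    simp [PySem.Chars.isdigit, Char.le_def] at h
    obtain ⟨h1, h2⟩ := h
    have h1' : 48 ≤ c.toNat := h1
    have h2' : c.toNat ≤ 57 := h2
    have hc : c = Char.ofNat c.toNat := (Char.ofNat_toNat c).symm
    rw [hc]
    interval_cases h : (c.toNat) <;> decide
  simp [pvVal, this]

theorem pvVal_digit_bounds (c : Char) (h : PySem.Chars.isdigit c = true) :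
    0 ≤ pvVal c ∧ pvVal c ≤ 9 := by
  have := pvVal_digit c h
  simp [PySem.Chars.isdigit, Char.le_def] at h
  obtain ⟨h1, h2⟩ := h
  have h1' : (48 : Nat) ≤ c.toNat := h1
  have h2' : c.toNat ≤ 57 := h2
  omega

-- each step of foldl max keeps the accumulator below the result
theorem le_foldl_max_int (xs : List Int) (a : Int) : a ≤ xs.foldl max a := by
  induction xs generalizing a with
  | nil => simp
  | cons x t ih => exact le_trans (le_max_left a x) (ih (max a x))

-- the foldl max is attained when it moves off the seed
theorem foldl_max_mem_int (xs : List Int) (a : Int) (h : xs.foldl max a ≠ a) :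
    xs.foldl max a ∈ xs := by
  induction xs generalizing a with
  | nil => simp at h
  | cons x t ih =>
    by_cases hx : x ≤ a
    · have : max a x = a := max_eq_left hx
      simp only [List.foldl_cons, this] at h ⊢
      exact List.mem_cons_of_mem _ (ih a h)
    · simp only [List.foldl_cons]
      by_cases ht : t.foldl max (max a x) = max a x
      · rw [ht, max_eq_right (not_le.mp hx).le]
        exact List.mem_cons_self ..
      · exact List.mem_cons_of_mem _ (ih (max a x) ht)

-- B's max?/maxD reduction agrees with A's running max when all values dominate the seed
theorem maxD_eq_foldl_max (xs : List Int) (h : ∀ x ∈ xs, 0 ≤ x) :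
    PySem.List.maxD xs id (-1) = xs.foldl max (-1) := by
  cases xs with
  | nil => simp [PySem.List.maxD, PySem.List.max?]
  | cons x t =>
    have hx : 0 ≤ x := h x (List.mem_cons_self ..)
    simp only [PySem.List.maxD, PySem.List.max?, List.foldl_cons, id]
    rw [show max (-1) x = x from max_eq_right (by omega)]
    clear h hx
    induction t generalizing x with
    | nil => simp
    | cons y r ih =>
      simp only [List.foldl_cons]
      by_cases hxy : x < y
      · rw [if_pos hxy, max_eq_right hxy.le]
        exact ih y
      · rw [if_neg hxy, max_eq_left (not_lt.mp hxy)]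
        exact ih x

-- characterization of A's fused loop: its result is the foldl max and, if it moved,
-- the first index at which that max value occurs
theorem foldA_spec (cs : List Char) (s a p : Int) :
    (PySem.List.enumerate cs s).foldl
      (fun st q => if pvVal q.2 > st.1 then (pvVal q.2, q.1) else st) (a, p)
    = (if (cs.map pvVal).foldl max a = a then (a, p)
       else ((cs.map pvVal).foldl max a,
             s + (((cs.map pvVal).idxOf ((cs.map pvVal).foldl max a) : Nat) : Int))) := by
  induction cs generalizing s a p with
  | nil => simp
  | cons c t ih =>
    rw [PySem.List.enumerate_cons]
    simp only [List.foldl_cons, List.map_cons]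
    by_cases hc : pvVal c > a
    · rw [if_pos hc, ih (s + 1) (pvVal c) s]
      have hM : (t.map pvVal).foldl (fun x1 x2 => max x1 x2) (max a (pvVal c)) =
                (t.map pvVal).foldl (fun x1 x2 => max x1 x2) (pvVal c) := by
        rw [max_eq_right (le_of_lt hc)]
      set vals := t.map pvVal with hv
      have hge : pvVal c ≤ vals.foldl max (pvVal c) := le_foldl_max_int vals (pvVal c)
      by_cases hM' : vals.foldl max (pvVal c) = pvVal c
      · rw [if_pos hM']
        have hMa : (List.foldl max a (pvVal c :: vals)) ≠ a := by
          rw [List.foldl_cons, max_eq_right (le_of_lt hc)]; omega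
        rw [if_neg (by simpa using hMa)]
        simp only [hM, hM']
        simp
      · rw [if_neg hM']
        have hMa : (List.foldl max a (pvVal c :: vals)) ≠ a := by
          rw [List.foldl_cons, max_eq_right (le_of_lt hc)]; omega
        rw [if_neg (by simpa using hMa)]
        simp only [hM]
        have hne : (pvVal c == vals.foldl max (pvVal c)) = false := by
          simpa using (Ne.symm hM')
        rw [List.idxOf_cons, hne]
        simp only [cond_false, Prod.mk.injEq]
        refine ⟨trivial, by push_cast; ring⟩
    · rw [if_neg hc, ih (s + 1) a p]
      have hM : (t.map pvVal).foldl (fun x1 x2 => max x1 x2) (max a (pvVal c)) =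
                (t.map pvVal).foldl (fun x1 x2 => max x1 x2) a := by
        rw [max_eq_left (not_lt.mp hc)]
      set vals := t.map pvVal with hv
      by_cases hM' : vals.foldl max a = a
      · rw [if_pos hM', if_pos (by simp only [hM]; exact hM')]
      · rw [if_neg hM']
        rw [if_neg (by simp only [hM]; exact hM')]
        simp only [hM]
        have hlt : pvVal c ≠ vals.foldl max a := by
          have := le_foldl_max_int vals a
          have hle := not_lt.mp hc
          intro hcontra
          exact hM' (le_antisymm (by omega) this)
        have hne : (pvVal c == vals.foldl max a) = false := by simpa using hlt
        rw [List.idxOf_cons, hne]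
        simp only [cond_false, Prod.mk.injEq]
        refine ⟨trivial, by push_cast; ring⟩

-- first occurrence of the max value in the char list equals the first occurrence
-- of its digit character
theorem index?_digitChar (cs : List Char) (h : cs.all PySem.Chars.isdigit = true)
    (M : Int) (hM0 : 0 ≤ M) (hmem : M ∈ cs.map pvVal) :
    PySem.List.index? cs (Char.ofNat (48 + M).toNat) = some ((cs.map pvVal).idxOf M) := by
  induction cs with
  | nil => simp at hmem
  | cons c t ih =>
    simp only [List.all_cons, Bool.and_eq_true] at h
    obtain ⟨hc, ht⟩ := h
    have hvc := pvVal_digit c hc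
    have hb := pvVal_digit_bounds c hc
    have hchar : (c = Char.ofNat (48 + M).toNat) ↔ (pvVal c = M) := by
      constructor
      · intro he
        have hMn : (48 + M).toNat = 48 + M.toNat := by omega
        have hM9 : M ≤ 9 := by
          rcases List.mem_cons.mp hmem with h1 | h2
          · omega
          · obtain ⟨d, hd, hdv⟩ := List.mem_map.mp h2
            have := pvVal_digit_bounds d (by
              have := List.all_eq_true.mp ht d hd; exact this)
            omega
        have hval : (Char.ofNat (48 + M).toNat).toNat = 48 + M.toNat := by
          rw [hMn, Char.ofNat, dif_pos (Or.inl (by omega) : Nat.isValidChar (48 + M.toNat))]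
          simp [Char.ofNatAux, Char.toNat]
          omega
        rw [hvc, he, hval]; omega
      · intro hv
        have : c.toNat = (48 + M).toNat := by omega
        have := congrArg Char.ofNat this
        rwa [Char.ofNat_toNat] at this
    rw [PySem.List.index?_eq_idxOf?]
    by_cases hv : pvVal c = M
    · have he : c = Char.ofNat (48 + M).toNat := hchar.mpr hv
      simp [List.idxOf?_cons, ← he, hv]
    · have he : c ≠ Char.ofNat (48 + M).toNat := fun hh => hv (hchar.mp hh)
      have hmem' : M ∈ t.map pvVal := by
        rcases List.mem_cons.mp hmem with h1 | h2
        · exact absurd h1.symm hv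
        · exact h2
      have := ih ht hmem'
      rw [PySem.List.index?_eq_idxOf?] at this
      simp only [List.map_cons, List.idxOf?_cons, List.idxOf_cons,
        beq_iff_eq]
      rw [if_neg he]
      have hvne : (pvVal c == M) = false := by simpa using hv
      rw [hvne]
      simp [this]

-- ===== VERDICT (by name: the statement is the Claim_ definition above) =====
theorem findMaxAndPositionBetweenIdx_spec : Claim_equal_findMaxAndPositionBetweenIdx := by
  intro str startIdx endIdx _hdom hpre
  unfold Spec_findMaxAndPositionBetweenIdx findMaxAndPositionBetweenIdx findMaxAndPositionBetweenIdx_alt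
  simp only [show (fun c => (PySem.Int.ofChars? [c]).getD 0) = pvVal from rfl]
  have hpre' : (PySem.List.slice str.toList (some startIdx) (some endIdx)).all PySem.Chars.isdigit = true := hpre
  generalize hg : PySem.List.slice str.toList (some startIdx) (some endIdx) = sl at hpre' ⊢
  rw [foldA_spec sl 0 (-1) (-1)]
  cases sl with
  | nil => simp [PySem.List.maxD, PySem.List.max?]
  | cons c t =>
    have hnn : ∀ x ∈ (c :: t).map pvVal, 0 ≤ x := by
      intro x hx
      obtain ⟨d, hd, hdv⟩ := List.mem_map.mp hx
      have hdig := List.all_eq_true.mp hpre' d hd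
      have := pvVal_digit_bounds d hdig
      omega
    set vals := (c :: t).map pvVal with hv
    have hMne : vals.foldl max (-1) ≠ -1 := by
      have h1 : pvVal c ≤ vals.foldl max (-1) := by
        have : max (-1) (pvVal c) ≤ vals.foldl max (-1) := by
          simpa [hv] using le_foldl_max_int (t.map pvVal) (max (-1) (pvVal c))
        omega
      have h0 : 0 ≤ pvVal c := hnn (pvVal c) (by simp [hv])
      omega
    rw [if_neg hMne]
    have hmem : vals.foldl max (-1) ∈ vals := foldl_max_mem_int vals (-1) hMne
    have hM0 : 0 ≤ vals.foldl max (-1) := hnn _ hmem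
    have hmaxd := maxD_eq_foldl_max vals hnn
    have hidx := index?_digitChar (c :: t) hpre' (vals.foldl max (-1)) hM0 (by rwa [← hv])
    simp only [hv] at hmaxd hidx ⊢
    rw [hmaxd, hidx]
    simp
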